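-- pv_equiv track=rewrite | github.com/KotisKotlyandii/lessons1 | ege22/176.py | f
-- ===== SOURCE A (Python) =====
-- def f(x):
--     m,s = 0,0
--     while x > 0:
--         d = x % 7
--         s += d
--         if d > m: m = d
--         x //= 7
--     return m,s
-- ===== SOURCE B (Python) =====
-- def f(x):
--     if x <= 0:
--         return (0, 0)
--     p = 1
--     while p * 7 <= x:
--         p *= 7
--     m = s = 0
--     while p > 0:
--         d = x // p
--         s += d
--         if d > m:
--             m = d
--         x -= d * p
--         p //= 7
--     return (m, s)
-- ===== Notes on version B (the rewrite author's own statement) =====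
-- stated objective: alternative
-- what changed: B extracts the base-7 digits most-significant-first: it first climbs to the largest power of 7 not exceeding x, then walks the powers back down, taking each leading digit by integer division and subtracting it off, instead of A's least-significant-first mod/floordiv loop.
import Mathlib
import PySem

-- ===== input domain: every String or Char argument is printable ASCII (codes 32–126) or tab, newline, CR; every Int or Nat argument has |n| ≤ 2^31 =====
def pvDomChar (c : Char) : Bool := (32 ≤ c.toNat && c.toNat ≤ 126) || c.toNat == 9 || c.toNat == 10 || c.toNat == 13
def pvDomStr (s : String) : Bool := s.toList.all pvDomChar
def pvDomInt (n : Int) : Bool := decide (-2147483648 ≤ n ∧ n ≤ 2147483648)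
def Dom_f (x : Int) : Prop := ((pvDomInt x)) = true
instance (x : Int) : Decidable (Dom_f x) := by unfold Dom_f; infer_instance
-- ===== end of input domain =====

-- B extracts the base-7 digits most-significant-first (climb to the top power of 7, then divide down), instead of A's least-significant-first mod/div loop; alternative decomposition, same cost.


-- ===== PORT A =====
-- A's while-loop with state (m, s, x): one fused LSB-first pass updating running max and running sum.
def fLoop (m s x : Int) : Int × Int :=
  if _h : 0 < x then
    let d := PySem.Int.mod x 7
    fLoop (if d > m then d else m) (s + d) (PySem.Int.floordiv x 7)
  else (m, s)
termination_by x.toNat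
decreasing_by
  rw [PySem.Int.floordiv_eq_ediv_of_pos (by omega : (0:Int) < 7)]
  omega

def f (x : Int) : Int × Int := fLoop 0 0 x

-- ===== PORT B =====
-- B's first loop: climb to the largest power of 7 not exceeding x (always called with 0 < p).
def powLoop (x p : Int) (hp : 0 < p) : Int :=
  if _h : p * 7 ≤ x then powLoop x (p * 7) (by omega) else p
termination_by (x - p).toNat
decreasing_by omega

-- B's second loop: walk the powers down, peeling off the leading digit each time.
def msbLoop (m s x p : Int) : Int × Int :=
  if _h : 0 < p then
    let d := PySem.Int.floordiv x p
    msbLoop (if d > m then d else m) (s + d) (x - d * p) (PySem.Int.floordiv p 7)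
  else (m, s)
termination_by p.toNat
decreasing_by
  rw [PySem.Int.floordiv_eq_ediv_of_pos (by omega : (0:Int) < 7)]
  omega

def f_alt (x : Int) : Int × Int :=
  if x ≤ 0 then (0, 0)
  else msbLoop 0 0 x (powLoop x 1 (by omega))

-- ===== PRECONDITION & SPEC =====
def Spec_f (x : Int) (out : Int × Int) : Prop := out = f_alt x
instance (x : Int) (out : Int × Int) : Decidable (Spec_f x out) := by unfold Spec_f; infer_instance

-- ===== CLAIM (what is proved, stated in full; the proofs are below) =====
def Claim_equal_f : Prop := ∀ (x : Int), Dom_f x → Spec_f x (f x)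

-- ===== LEMMAS AND PROOFS =====

-- Abstract base-7 digit sum and max (proof-only helpers).
def S7 (x : Int) : Int := if 0 < x then x % 7 + S7 (x / 7) else 0
termination_by x.toNat
decreasing_by omega

def M7 (x : Int) : Int := if 0 < x then max (x % 7) (M7 (x / 7)) else 0
termination_by x.toNat
decreasing_by omega

theorem S7_zero : S7 0 = 0 := by rw [S7]; norm_num

theorem M7_zero : M7 0 = 0 := by rw [M7]; norm_num

theorem M7_nonneg (x : Int) : 0 ≤ M7 x := by
  induction x using M7.induct with
  | case1 x h ih => rw [M7, if_pos h]; omega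
  | case2 x h => rw [M7, if_neg h]

theorem S7_unfold (a : Int) (ha : 0 ≤ a) : S7 a = a % 7 + S7 (a / 7) := by
  rcases lt_or_eq_of_le ha with h | h
  · conv_lhs => rw [S7, if_pos h]
  · rw [← h]; simp [S7_zero]

theorem M7_unfold (a : Int) (ha : 0 ≤ a) : M7 a = max (a % 7) (M7 (a / 7)) := by
  rcases lt_or_eq_of_le ha with h | h
  · conv_lhs => rw [M7, if_pos h]
  · rw [← h]; simp [M7_zero]

theorem S7_digit (d : Int) (h0 : 0 ≤ d) (h7 : d < 7) : S7 d = d := by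
  rw [S7_unfold d h0]
  have h1 : d % 7 = d := by omega
  have h2 : d / 7 = 0 := by omega
  rw [h1, h2, S7_zero]; ring

theorem M7_digit (d : Int) (h0 : 0 ≤ d) (h7 : d < 7) : M7 d = d := by
  rw [M7_unfold d h0]
  have h1 : d % 7 = d := by omega
  have h2 : d / 7 = 0 := by omega
  rw [h1, h2, M7_zero]
  omega

theorem if_gt_eq_max (m d : Int) : (if d > m then d else m) = max m d := by
  simp only [max_def]; split_ifs <;> omega

-- A's fused loop computes (max of seed and digit-max, seed plus digit-sum).
theorem fLoop_eq (m s x : Int) (hm : 0 ≤ m) :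
    fLoop m s x = (max m (M7 x), s + S7 x) := by
  induction x using S7.induct generalizing m s with
  | case1 x h ih =>
    rw [fLoop, dif_pos h]
    simp only [PySem.Int.mod_eq_emod_of_pos (by omega : (0:Int) < 7),
      PySem.Int.floordiv_eq_ediv_of_pos (by omega : (0:Int) < 7)]
    have hd : 0 ≤ x % 7 := by omega
    rw [ih _ _ (by omega)]
    rw [S7_unfold x (by omega), M7_unfold x (by omega), if_gt_eq_max, max_assoc]
    simp only [Prod.mk.injEq]
    exact ⟨trivial, by ring⟩
  | case2 x h =>
    rw [fLoop, dif_neg h, S7, if_neg h, M7, if_neg h]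
    rw [max_eq_left hm]
    simp

-- Splitting off the leading block: digit sum/max distribute over a + b·7^(k+1) when a < 7^(k+1).
theorem split_S7_M7 (k : Nat) : ∀ (a b : Int), 0 ≤ a → a < 7^(k+1) → 0 ≤ b →
    S7 (a + b * 7^(k+1)) = S7 a + S7 b ∧ M7 (a + b * 7^(k+1)) = max (M7 a) (M7 b) := by
  induction k with
  | zero =>
    intro a b ha ha7 hb
    rcases lt_or_eq_of_le hb with hbpos | hb0
    · have hx : 0 < a + b * 7^(0+1) := by nlinarith
      have hm : (a + b * 7^(0+1)) % 7 = a := by norm_num; omega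
      have hd : (a + b * 7^(0+1)) / 7 = b := by norm_num; omega
      rw [S7_unfold _ (by omega), M7_unfold _ (by omega), hm, hd,
        S7_digit a ha (by norm_num at ha7; omega), M7_digit a ha (by norm_num at ha7; omega)]
      exact ⟨rfl, rfl⟩
    · rw [← hb0]
      refine ⟨by simp [S7_zero], by simp [M7_zero, max_eq_left (M7_nonneg a)]⟩
  | succ k ih =>
    intro a b ha ha7 hb
    rcases lt_or_eq_of_le hb with hbpos | hb0
    · have h7 : (7:Int)^(k+1+1) = 7 * 7^(k+1) := by ring
      have hppos : (0:Int) < 7^(k+1) := by positivity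
      set t := b * 7^(k+1) with ht
      have htpos : 0 < t := by rw [ht]; positivity
      have hx : a + b * 7^(k+1+1) = a + 7 * t := by rw [ht, h7]; ring
      have hm : (a + 7 * t) % 7 = a % 7 := by omega
      have hd : (a + 7 * t) / 7 = a / 7 + t := by omega
      have ha2 : a / 7 < 7^(k+1) := by rw [h7] at ha7; omega
      obtain ⟨hS, hM⟩ := ih (a/7) b (by omega) ha2 hb
      rw [← ht] at hS hM
      rw [hx, S7_unfold _ (by omega), M7_unfold _ (by omega), hm, hd, hS, hM,
        S7_unfold a ha, M7_unfold a ha]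
      exact ⟨by ring, by rw [← max_assoc]⟩
    · rw [← hb0]
      refine ⟨by simp [S7_zero], by simp [M7_zero, max_eq_left (M7_nonneg a)]⟩

-- B's digit loop over powers 7^k, 7^(k-1), …, 1 computes the same pair.
theorem msbLoop_eq (k : Nat) : ∀ (m s x : Int), 0 ≤ m → 0 ≤ x → x < 7^(k+1) →
    msbLoop m s x (7^k) = (max m (M7 x), s + S7 x) := by
  induction k with
  | zero =>
    intro m s x hm hx hx7
    norm_num at hx7
    rw [msbLoop, dif_pos (by norm_num : (0:Int) < 7^0)]
    simp only [pow_zero]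
    have hd : PySem.Int.floordiv x 1 = x := by
      rw [PySem.Int.floordiv_eq_ediv_of_pos (by omega : (0:Int) < 1)]; omega
    have hp' : PySem.Int.floordiv 1 7 = 0 := by
      rw [PySem.Int.floordiv_eq_ediv_of_pos (by omega : (0:Int) < 7)]; decide
    rw [hd, hp']
    rw [msbLoop, dif_neg (by omega)]
    rw [S7_digit x hx hx7, M7_digit x hx hx7, if_gt_eq_max]
  | succ k ih =>
    intro m s x hm hx hx7
    have hppos : (0:Int) < 7^(k+1) := by positivity
    have h7 : (7:Int)^(k+1+1) = 7 * 7^(k+1) := by ring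
    rw [msbLoop, dif_pos hppos]
    simp only [PySem.Int.floordiv_eq_ediv_of_pos hppos,
      PySem.Int.floordiv_eq_ediv_of_pos (by omega : (0:Int) < 7)]
    set p : Int := 7^(k+1) with hp
    set d : Int := x / p with hdd
    have hd0 : 0 ≤ d := by rw [hdd]; exact Int.ediv_nonneg hx (le_of_lt hppos)
    have hd7 : d < 7 := by
      rw [hdd]
      rw [Int.ediv_lt_iff_lt_mul hppos]
      rw [h7] at hx7
      omega
    have hrmod : x - d * p = x % p := by
      rw [hdd, Int.emod_def]; ring
    have hr0 : 0 ≤ x - d * p := by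
      rw [hrmod]; exact Int.emod_nonneg x (ne_of_gt hppos)
    have hr7 : x - d * p < p := by
      rw [hrmod]; exact Int.emod_lt_of_pos x hppos
    have hp7 : p / 7 = 7^k := by
      rw [hp, pow_succ, mul_comm]
      exact Int.mul_ediv_cancel_left _ (by omega)
    rw [hp7, if_gt_eq_max, ih (max m d) (s + d) (x - d * p)
      (le_trans hm (le_max_left _ _)) hr0 hr7]
    obtain ⟨hS, hM⟩ := split_S7_M7 k (x - d * p) d hr0 (by rw [← hp]; exact hr7) hd0
    rw [← hp] at hS hM
    rw [show x - d * p + d * p = x from by ring] at hS hM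
    rw [hS, hM, S7_digit d hd0 hd7, M7_digit d hd0 hd7]
    simp only [Prod.mk.injEq]
    exact ⟨by rw [max_assoc, max_comm d (M7 (x - d * p))], by ring⟩

-- powLoop, started at a power of 7, returns a power 7^j with x < 7^(j+1).
theorem powLoop_pow (x : Int) : ∀ (p : Int) (hp : 0 < p) (k : Nat), p = 7^k →
    ∃ j : Nat, powLoop x p hp = 7^j ∧ x < 7^(j+1) := by
  refine powLoop.induct x
    (motive := fun p hp => ∀ (k : Nat), p = 7^k →
      ∃ j : Nat, powLoop x p hp = 7^j ∧ x < 7^(j+1)) ?_ ?_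
  · intro p hp h ih k hk
    rw [powLoop, dif_pos h]
    exact ih (k+1) (by rw [hk]; ring)
  · intro p hp h k hk
    rw [powLoop, dif_neg h]
    refine ⟨k, hk, ?_⟩
    have h2 : (7:Int)^(k+1) = 7^k * 7 := by ring
    rw [h2, ← hk]
    omega

-- ===== VERDICT (by name: the statement is the Claim_ definition above) =====
theorem f_spec : Claim_equal_f := by
  intro x _
  unfold Spec_f f f_alt
  rw [fLoop_eq 0 0 x le_rfl, max_eq_right (M7_nonneg x), zero_add]
  rcases (by omega : x ≤ 0 ∨ 0 < x) with hx | hx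
  · rw [if_pos hx, S7, if_neg (by omega), M7, if_neg (by omega)]
  · rw [if_neg (by omega)]
    obtain ⟨j, hj, hxj⟩ := powLoop_pow x 1 (by omega) 0 (by norm_num)
    rw [hj, msbLoop_eq j 0 0 x le_rfl (le_of_lt hx) hxj,
      max_eq_right (M7_nonneg x), zero_add]
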